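-- pv_equiv track=rewrite | github.com/shadmanrahman1/AI_News_Reporter | utils.py | extract_headlines
-- ===== SOURCE A (Python) =====
-- def extract_headlines(cleaned_text: str) -> str:
--     """
--     Extract and concatenate headlines from cleaned news text content.
--
--     Args:
--         cleaned_text: Raw text from news page after HTML cleaning
--
--     Returns:
--         str: Combined headlines separated by newlines
--     """
--
--     headlines = []
--     current_block = []
--
--     lines = [line.strip() for line in cleaned_text.split("\n") if line.strip()]
--
--     for line in lines:
--         if line == "More":
--             if current_block:
--                 headlines.append(current_block[0])
--                 current_block = []  # reset for next block
--
--         else: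
--             current_block.append(line)
--
--     if current_block:  # if there's any remaining block (Headers), add it
--         headlines.append(current_block[0])
--
--     return "\n".join(headlines)
-- ===== SOURCE B (Python) =====
-- def extract_headlines(cleaned_text: str) -> str:
--     lines = [line.strip() for line in cleaned_text.split("\n") if line.strip()]
--     # A headline is exactly a non-"More" line whose predecessor (virtually "More"
--     # at the start) is "More": the first line of each block.
--     return "\n".join(
--         line
--         for prev, line in zip(["More"] + lines, lines)
--         if line != "More" and prev == "More"
--     )
-- ===== Notes on version B (the rewrite author's own statement) =====
-- stated objective: simpler
-- what changed: Replaces the accumulator loop with explicit current_block state by a single zip-with-predecessor filter: a line is a headline iff it is not 'More' and its predecessor is 'More' (virtual 'More' at the start).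
import Mathlib
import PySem

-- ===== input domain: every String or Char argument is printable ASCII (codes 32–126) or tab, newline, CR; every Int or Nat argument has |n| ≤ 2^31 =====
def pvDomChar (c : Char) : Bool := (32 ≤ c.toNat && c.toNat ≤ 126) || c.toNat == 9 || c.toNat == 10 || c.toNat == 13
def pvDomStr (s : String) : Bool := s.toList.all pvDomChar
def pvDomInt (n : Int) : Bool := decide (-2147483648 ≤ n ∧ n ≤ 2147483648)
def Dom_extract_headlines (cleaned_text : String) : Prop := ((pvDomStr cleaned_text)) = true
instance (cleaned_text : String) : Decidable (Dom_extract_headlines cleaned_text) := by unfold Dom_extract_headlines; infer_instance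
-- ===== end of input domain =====

-- B replaces A's accumulator loop by a zip-with-predecessor filter (objective: simpler).

-- ===== PORT A =====
-- one step of A's for-loop; state = (headlines, current_block)
def pvStepA (st : List String × List String) (line : String) : List String × List String :=
  if line == "More" then
    if st.2 ≠ [] then (st.1 ++ [st.2.head!], []) else st
  else (st.1, st.2 ++ [line])

def extract_headlines (cleaned_text : String) : String :=
  let lines := (((PySem.Str.split? cleaned_text "\n").getD []).filter
      (fun l => PySem.Str.strip l ≠ "")).map PySem.Str.strip
  let st := lines.foldl pvStepA ([], [])
  let headlines := if st.2 ≠ [] then st.1 ++ [st.2.head!] else st.1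
  PySem.Str.join "\n" headlines

-- ===== PORT B =====
def extract_headlines_alt (cleaned_text : String) : String :=
  let lines := (((PySem.Str.split? cleaned_text "\n").getD []).filter
      (fun l => PySem.Str.strip l ≠ "")).map PySem.Str.strip
  PySem.Str.join "\n"
    (((("More" :: lines).zip lines).filter
        (fun p => p.2 != "More" && p.1 == "More")).map Prod.snd)

-- ===== PRECONDITION & SPEC =====
def Spec_extract_headlines (cleaned_text : String) (out : String) : Prop := out = extract_headlines_alt cleaned_text
instance (cleaned_text : String) (out : String) : Decidable (Spec_extract_headlines cleaned_text out) := by unfold Spec_extract_headlines; infer_instance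

-- ===== CLAIM (what is proved, stated in full; the proofs are below) =====
def Claim_equal_extract_headlines : Prop := ∀ (cleaned_text : String), Dom_extract_headlines cleaned_text → Spec_extract_headlines cleaned_text (extract_headlines cleaned_text)

-- ===== LEMMAS AND PROOFS =====

-- the common specification of both passes: first line of each maximal non-"More" block
def pvEmit (inBlock : Bool) : List String → List String
  | [] => []
  | l :: rest =>
      if l == "More" then pvEmit false rest
      else if inBlock then pvEmit true rest
      else l :: pvEmit true rest

theorem pvFoldA_emit (lines : List String) :
    ∀ (hs cb : List String),
      (let st := lines.foldl pvStepA (hs, cb)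
       if st.2 ≠ [] then st.1 ++ [st.2.head!] else st.1) =
      hs ++ (match cb with
             | [] => pvEmit false lines
             | h :: _ => h :: pvEmit true lines) := by
  induction lines with
  | nil =>
      intro hs cb
      cases cb <;> simp [pvEmit]
  | cons l rest ih =>
      intro hs cb
      by_cases hM : l = "More"
      · subst hM
        cases cb with
        | nil => simpa [pvStepA, pvEmit] using ih hs []
        | cons h t => simpa [pvStepA, pvEmit] using ih (hs ++ [h]) []
      · cases cb with
        | nil => simpa [pvStepA, pvEmit, hM] using ih hs [l]
        | cons h t => simpa [pvStepA, pvEmit, hM] using ih hs (h :: t ++ [l])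

theorem pvZipB_emit (lines : List String) :
    ∀ (prev : String),
      (((prev :: lines).zip lines).filter
          (fun p => p.2 != "More" && p.1 == "More")).map Prod.snd =
      pvEmit (prev != "More") lines := by
  induction lines with
  | nil => intro prev; simp [pvEmit]
  | cons l rest ih =>
      intro prev
      by_cases hM : l = "More"
      · subst hM
        simp [pvEmit, ih]
      · have hb : (l != "More") = true := by simp [hM]
        by_cases hP : prev = "More"
        · subst hP
          simp [pvEmit, hM, ih, hb]
        · simp [pvEmit, hM, hP, ih, hb]

-- ===== VERDICT (by name: the statement is the Claim_ definition above) =====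
theorem extract_headlines_spec : Claim_equal_extract_headlines := by
  intro cleaned_text _
  unfold Spec_extract_headlines extract_headlines extract_headlines_alt
  simp only [pvZipB_emit, pvFoldA_emit]
  simp
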